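-- pv_equiv track=rewrite | github.com/Ashi-s/coding_problems | FT_Coding/nutanix/primeString.py | primeString
-- ===== SOURCE A (Python) =====
-- import math
--
-- def isPrime(n):
--   for i in range (2,int(math.sqrt(n))+1):
--     if n%i==0:
--       return False
--   return True
--
-- def primeString(string):
--     res = []
--     for i in string:
--         ascii = ord(i)
--         if isPrime(ascii):
--             res.append(i)
--         else:
--             s = True
--             j = ascii
--             k = ascii
--             while s:
--                 if isPrime(j-1) and j-1 >= 65:
--                     res.append(chr(j-1))
--                     s = False
--
--                 elif isPrime(k+1) and k+1 <= 122:
--                     res.append(chr(k+1))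
--                     s = False
--                 j -= 1
--                 k += 1
--     return ''.join(res)
-- ===== SOURCE B (Python) =====
-- import math
--
-- def isPrime(n):
--   for i in range (2,int(math.sqrt(n))+1):
--     if n%i==0:
--       return False
--   return True
--
-- def _belowPrime(n):
--     # largest prime strictly below n that is >= 65, else None
--     lo = n - 1
--     while lo >= 65 and not isPrime(lo):
--         lo -= 1
--     return lo if lo >= 65 else None
--
-- def _abovePrime(n):
--     # smallest prime strictly above n that is <= 122, else None
--     hi = n + 1
--     while hi <= 122 and not isPrime(hi):
--         hi += 1
--     return hi if hi <= 122 else None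
--
-- def primeString(string):
--     out = []
--     for c in string:
--         a = ord(c)
--         if isPrime(a):
--             out.append(c)
--         else:
--             below = _belowPrime(a)
--             above = _abovePrime(a)
--             if below is not None and (above is None or a - below <= above - a):
--                 out.append(chr(below))
--             else:
--                 out.append(chr(above))
--     return ''.join(out)
-- ===== Notes on version B (the rewrite author's own statement) =====
-- stated objective: alternative
-- what changed: Replaces A's single interleaved two-pointer while-loop (checking one lower and one upper candidate per turn) by two independent directional scans computing the nearest prime below (>=65) and above (<=122), then a distance comparison with tie-to-below.
import Mathlib
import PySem

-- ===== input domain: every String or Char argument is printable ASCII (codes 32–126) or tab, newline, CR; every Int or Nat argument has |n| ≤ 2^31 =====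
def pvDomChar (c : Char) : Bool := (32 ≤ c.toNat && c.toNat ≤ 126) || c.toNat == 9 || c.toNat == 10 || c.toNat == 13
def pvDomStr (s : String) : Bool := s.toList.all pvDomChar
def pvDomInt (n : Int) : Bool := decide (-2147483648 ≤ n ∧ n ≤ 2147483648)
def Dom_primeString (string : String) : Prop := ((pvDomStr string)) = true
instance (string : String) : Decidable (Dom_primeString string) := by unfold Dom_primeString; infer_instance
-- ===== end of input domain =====

-- B replaces A's single interleaved two-pointer while-loop by two separate directional
-- prime scans (nearest prime below ≥65, nearest prime above ≤122) plus a distance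
-- comparison with tie-to-below; objective: alternative decomposition, same cost.

-- shared module-level helper (identical in Source A and Source B)
-- int(math.sqrt(n)): exact floor square root for the small nonnegative n this program
-- feeds it (float sqrt is exact at this scale); computed as the largest i ≤ n with i*i ≤ n
def isqrt (n : Nat) : Nat := (List.range (n + 1)).foldl (fun acc i => if i * i ≤ n then i else acc) 0

def isPrimeLoop (n : Int) : List Int → Bool
  | [] => true
  | i :: rest => if PySem.Int.mod n i == 0 then false else isPrimeLoop n rest

def isPrime (n : Int) : Bool :=
  isPrimeLoop n (PySem.List.pyRange 2 ((isqrt n.toNat : Int) + 1) 1)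

-- ===== PORT A =====
-- A's 'while s:' loop: checks j-1 (lower candidate) then k+1 (upper candidate) each turn;
-- fuel only makes the same computation total (Python diverges / raises only outside Dom)
def loopA (j k : Int) : Nat → Option Char
  | 0 => none
  | fuel + 1 =>
    if isPrime (j - 1) && decide (j - 1 ≥ 65) then some (Char.ofNat (j - 1).toNat)
    else if isPrime (k + 1) && decide (k + 1 ≤ 122) then some (Char.ofNat (k + 1).toNat)
    else loopA (j - 1) (k + 1) fuel

def tailA (ascii : Int) : List Char :=
  match loopA ascii ascii 1000 with
  | some c => [c]
  | none => []

def primeString (string : String) : String :=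
  String.mk (string.toList.foldl
    (fun res i =>
      let ascii : Int := (i.toNat : Int)
      if isPrime ascii then res ++ [i] else res ++ tailA ascii) [])

-- ===== PORT B =====
-- 'while lo >= 65 and not isPrime(lo): lo -= 1' then 'lo if lo >= 65 else None'
-- (the Nat counter (lo-64).toNat counts exactly the remaining candidates ≥ 65:
--  it is 0 iff lo < 65, i.e. iff the Python while-condition's bound fails)
def scanDownAux : Nat → Int → Option Int
  | 0, _ => none
  | n + 1, lo => if isPrime lo then some lo else scanDownAux n (lo - 1)

def scanDown (lo : Int) : Option Int := scanDownAux (lo - 64).toNat lo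

-- 'while hi <= 122 and not isPrime(hi): hi += 1' then 'hi if hi <= 122 else None'
-- (the counter (123-hi).toNat counts the remaining candidates ≤ 122)
def scanUpAux : Nat → Int → Option Int
  | 0, _ => none
  | n + 1, hi => if isPrime hi then some hi else scanUpAux n (hi + 1)

def scanUp (hi : Int) : Option Int := scanUpAux (123 - hi).toNat hi

def tailB (a : Int) : List Char :=
  match scanDown (a - 1), scanUp (a + 1) with
  | some b, some ab => if a - b ≤ ab - a then [Char.ofNat b.toNat] else [Char.ofNat ab.toNat]
  | some b, none => [Char.ofNat b.toNat]
  | none, some ab => [Char.ofNat ab.toNat]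
  | none, none => []  -- Python B raises TypeError (chr(None)) here; unreachable on Dom

def primeString_alt (string : String) : String :=
  String.mk (string.toList.foldl
    (fun out c =>
      let a : Int := (c.toNat : Int)
      if isPrime a then out ++ [c] else out ++ tailB a) [])

-- ===== PRECONDITION & SPEC =====
def Spec_primeString (string : String) (out : String) : Prop := out = primeString_alt string
instance (string : String) (out : String) : Decidable (Spec_primeString string out) := by unfold Spec_primeString; infer_instance

-- ===== CLAIM (what is proved, stated in full; the proofs are below) =====
def Claim_equal_primeString : Prop := ∀ (string : String), Dom_primeString string → Spec_primeString string (primeString string)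

-- ===== LEMMAS AND PROOFS =====

theorem tail_eq : ∀ n : Nat, n < 127 → tailA (n : Int) = tailB (n : Int) := by decide

theorem out_eq (c : Char) (h : pvDomChar c = true) :
    (if isPrime (c.toNat : Int) then [c] else tailA (c.toNat : Int))
      = (if isPrime (c.toNat : Int) then [c] else tailB (c.toNat : Int)) := by
  have hlt : c.toNat < 127 := by
    simp only [pvDomChar, Bool.or_eq_true, Bool.and_eq_true, decide_eq_true_eq, beq_iff_eq] at h
    omega
  rw [tail_eq c.toNat hlt]

theorem foldl_eq : ∀ (l : List Char), l.all pvDomChar = true →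
    ∀ acc : List Char,
      l.foldl (fun res i => let ascii : Int := (i.toNat : Int);
        if isPrime ascii then res ++ [i] else res ++ tailA ascii) acc
        = l.foldl (fun out c => let a : Int := (c.toNat : Int);
            if isPrime a then out ++ [c] else out ++ tailB a) acc := by
  intro l hl
  induction l with
  | nil => intro acc; rfl
  | cons c rest ih =>
    simp only [List.all_cons, Bool.and_eq_true] at hl
    intro acc
    simp only [List.foldl_cons]
    rw [ih hl.2]
    congr 1
    have := out_eq c hl.1
    by_cases hp : isPrime (c.toNat : Int) = true <;> simp [hp] at this ⊢ <;> simp [this]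

-- ===== VERDICT (by name: the statement is the Claim_ definition above) =====
theorem primeString_spec : Claim_equal_primeString := by
  intro s hdom
  unfold Spec_primeString primeString primeString_alt
  have : pvDomStr s = true := hdom
  unfold pvDomStr at this
  rw [foldl_eq s.toList this]
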